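-- pv_equiv track=rewrite | github.com/Dadsgoosen/Deep-Learning-DTU | graph.py | create_plt_data
-- ===== SOURCE A (Python) =====
-- def create_plt_data(data):
--     count = 0
--     y = []
--     x = []
--     for d in data:
--         if d[2] < 1:
--             count += 1
--         x.append(d[3])
--         y.append(count)
--     return x, y
-- ===== SOURCE B (Python) =====
-- def create_plt_data(data):
--     x = [d[3] for d in data]
--     y = [sum(1 for e in data[:i + 1] if e[2] < 1) for i in range(len(data))]
--     return x, y
-- ===== Notes on version B (the rewrite author's own statement) =====
-- stated objective: alternative
-- what changed: Replaces A's single fused loop with a running counter by two independent comprehensions: x as a plain projection, and y[i] recomputed directly as the count of rows with d[2] < 1 in the prefix data[:i+1].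
import Mathlib
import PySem

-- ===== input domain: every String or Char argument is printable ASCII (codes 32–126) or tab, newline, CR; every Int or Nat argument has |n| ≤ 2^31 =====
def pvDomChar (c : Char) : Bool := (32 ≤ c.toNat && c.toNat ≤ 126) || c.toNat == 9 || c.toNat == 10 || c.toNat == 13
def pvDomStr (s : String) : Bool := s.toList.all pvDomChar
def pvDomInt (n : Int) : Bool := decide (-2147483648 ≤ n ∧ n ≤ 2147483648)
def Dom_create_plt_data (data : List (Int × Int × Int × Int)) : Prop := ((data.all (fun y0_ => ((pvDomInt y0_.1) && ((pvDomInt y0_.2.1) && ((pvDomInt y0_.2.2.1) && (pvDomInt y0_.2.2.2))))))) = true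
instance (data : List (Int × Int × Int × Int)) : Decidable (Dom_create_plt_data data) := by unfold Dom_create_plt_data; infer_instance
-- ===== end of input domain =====

-- B replaces A's fused loop (running counter, append per row) by two independent
-- comprehensions: x is a plain projection and y[i] is recomputed as the count of
-- rows with d[2] < 1 in the prefix data[:i+1] (objective: alternative, not faster).

-- ===== PORT A =====
-- A: one loop, state (count, x, y); count incremented when d[2] < 1, appends d[3] and count.
def create_plt_data (data : List (Int × Int × Int × Int)) : List Int × List Int :=
  let st := data.foldl
    (fun (s : Int × List Int × List Int) d =>
      let count := if d.2.2.1 < 1 then s.1 + 1 else s.1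
      (count, s.2.1 ++ [d.2.2.2], s.2.2 ++ [count]))
    (0, [], [])
  (st.2.1, st.2.2)

-- ===== PORT B =====
-- B: x = [d[3] for d in data]; y = [sum(1 for e in data[:i+1] if e[2] < 1) for i in range(len(data))]
def create_plt_data_alt (data : List (Int × Int × Int × Int)) : List Int × List Int :=
  ( data.map (fun d => d.2.2.2),
    (PySem.List.pyRange 0 (data.length : Int) 1).map
      (fun i => ((PySem.List.slice data none (some (i + 1))).countP
                   (fun e => e.2.2.1 < 1) : Int)) )

-- ===== PRECONDITION & SPEC =====
def Spec_create_plt_data (data : List (Int × Int × Int × Int)) (out : List Int × List Int) : Prop := out = create_plt_data_alt data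
instance (data : List (Int × Int × Int × Int)) (out : List Int × List Int) : Decidable (Spec_create_plt_data data out) := by unfold Spec_create_plt_data; infer_instance

-- ===== CLAIM (what is proved, stated in full; the proofs are below) =====
def Claim_equal_create_plt_data : Prop := ∀ (data : List (Int × Int × Int × Int)), Dom_create_plt_data data → Spec_create_plt_data data (create_plt_data data)

-- ===== LEMMAS AND PROOFS =====

-- Invariant of A's loop: after processing l from state (c, xs, ys), the counter is
-- c plus the number of matching rows of l, x gets l's projections appended, and y
-- gets, for each position k of l, c plus the matching count of l's prefix of length k+1.
theorem create_plt_data_loop (l : List (Int × Int × Int × Int)) (c : Int) (xs ys : List Int) :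
    l.foldl
      (fun (s : Int × List Int × List Int) d =>
        let count := if d.2.2.1 < 1 then s.1 + 1 else s.1
        (count, s.2.1 ++ [d.2.2.2], s.2.2 ++ [count]))
      (c, xs, ys)
    = (c + (l.countP (fun e => e.2.2.1 < 1) : Int),
       xs ++ l.map (fun d => d.2.2.2),
       ys ++ (List.range l.length).map
         (fun k => c + ((l.take (k + 1)).countP (fun e => e.2.2.1 < 1) : Int))) := by
  induction l generalizing c xs ys with
  | nil => simp
  | cons d t ih =>
    simp only [List.foldl_cons, ih, List.countP_cons, List.map_cons, List.length_cons,
      List.range_succ_eq_map, List.map_map, Prod.mk.injEq, List.append_assoc,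
      List.singleton_append]
    refine ⟨?_, trivial, ?_⟩
    · by_cases h : d.2.2.1 < 1 <;> simp [h] <;> push_cast <;> omega
    · congr 1
      simp only [List.cons.injEq]
      refine ⟨?_, ?_⟩
      · by_cases h : d.2.2.1 < 1 <;> simp [h]
      · apply List.map_congr_left
        intro k hk
        simp only [Function.comp_apply, List.take_succ_cons, List.countP_cons]
        by_cases h : d.2.2.1 < 1 <;> simp [h] <;> push_cast <;> omega

-- ===== VERDICT (by name: the statement is the Claim_ definition above) =====
theorem create_plt_data_spec : Claim_equal_create_plt_data := by
  intro data _
  show create_plt_data data = create_plt_data_alt data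
  unfold create_plt_data create_plt_data_alt
  simp only [create_plt_data_loop, List.nil_append,
    PySem.List.pyRange_zero_nat, List.map_map, Prod.mk.injEq]
  refine ⟨trivial, ?_⟩
  apply List.map_congr_left
  intro k hk
  simp only [Function.comp_apply]
  rw [show ((k : Int) + 1) = ((k + 1 : Nat) : Int) by push_cast; ring,
    PySem.List.slice_to_natCast]
  simp
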